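-- pv_equiv track=rewrite | github.com/thelab33/futurefunded | tools/ff_css_refresh.py | strip_css_noise
-- ===== SOURCE A (Python) =====
-- from typing import Dict, List, Optional, Set, Tuple
--
-- def strip_css_noise(css: str) -> str:
--     """
--     Removes comment bodies and string bodies (replaces with spaces).
--     Helps avoid matching selectors inside comments or quoted content.
--     """
--     out: List[str] = []
--     in_comment = False
--     in_string: Optional[str] = None
--     escape = False
--     i = 0
--
--     while i < len(css):
--         ch = css[i]
--         nxt = css[i + 1] if i + 1 < len(css) else ""
--
--         if in_comment:
--             if ch == "*" and nxt == "/":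
--                 in_comment = False
--                 out.append("  ")
--                 i += 2
--                 continue
--             out.append(" ")
--             i += 1
--             continue
--
--         if in_string is not None:
--             if escape:
--                 escape = False
--                 out.append(" ")
--                 i += 1
--                 continue
--             if ch == "\\":
--                 escape = True
--                 out.append(" ")
--                 i += 1
--                 continue
--             if ch == in_string:
--                 in_string = None
--                 out.append(ch)
--                 i += 1
--                 continue
--             out.append(" ")
--             i += 1
--             continue
--
--         if ch == "/" and nxt == "*":
--             in_comment = True
--             out.append("  ")
--             i += 2
--             continue
--
--         if ch in ("'", '"'):
--             in_string = ch
--             out.append(ch)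
--             i += 1
--             continue
--
--         out.append(ch)
--         i += 1
--
--     return "".join(out)
-- ===== SOURCE B (Python) =====
-- def strip_css_noise(css: str) -> str:
--     """Token-block scanner: copies plain text verbatim, blanks whole
--     comment/string bodies in single blocks instead of a per-char state machine."""
--     out = []
--     i = 0
--     n = len(css)
--     while i < n:
--         ch = css[i]
--         if ch == "/" and css.startswith("/*", i):
--             j = css.find("*/", i + 2)
--             if j == -1:
--                 out.append(" " * (n - i))
--                 i = n
--             else:
--                 out.append(" " * (j + 2 - i))
--                 i = j + 2
--         elif ch in "'\"":
--             j = i + 1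
--             while j < n and css[j] != ch:
--                 j += 2 if css[j] == "\\" else 1
--             if j < n:
--                 out.append(ch + " " * (j - i - 1) + ch)
--                 i = j + 1
--             else:
--                 out.append(ch + " " * (n - i - 1))
--                 i = n
--         else:
--             out.append(ch)
--             i += 1
--     return "".join(out)
-- ===== Notes on version B (the rewrite author's own statement) =====
-- stated objective: faster
-- what changed: Replaces the per-character three-flag state machine with a token-block scanner that locates each comment terminator with one str.find call and emits blanked token bodies as single space-runs, copying plain text char-by-char only outside tokens.
import Mathlib
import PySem

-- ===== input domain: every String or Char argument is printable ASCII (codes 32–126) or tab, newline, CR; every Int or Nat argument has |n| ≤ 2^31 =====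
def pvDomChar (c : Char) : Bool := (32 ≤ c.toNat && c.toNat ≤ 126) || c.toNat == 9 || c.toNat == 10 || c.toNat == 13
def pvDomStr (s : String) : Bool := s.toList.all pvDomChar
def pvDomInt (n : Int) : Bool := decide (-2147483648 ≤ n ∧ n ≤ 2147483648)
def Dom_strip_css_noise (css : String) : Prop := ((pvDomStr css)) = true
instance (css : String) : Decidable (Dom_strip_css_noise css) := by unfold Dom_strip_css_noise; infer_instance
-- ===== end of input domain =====

-- B blanks comments/strings in whole blocks (find the token end, emit one run of spaces) instead of
-- A's per-character state machine with in_comment/in_string/escape flags; same output, measured faster in a timing run.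

-- ===== PORT A =====
-- A's while-loop over indices i with state (in_comment, in_string, escape), transliterated as
-- structural recursion on the remaining characters carrying the same three state variables;
-- the two-character lookahead (ch, nxt) becomes matching on the first two list elements.
def goA : List Char → Bool → Option Char → Bool → List Char
  | [], _, _, _ => []
  | ch :: rest, inComment, inString, escape =>
    if inComment then
      if ch = '*' ∧ rest.head? = some '/' then ' ' :: ' ' :: goA rest.tail false inString escape
      else ' ' :: goA rest true inString escape
    else
      match inString with
      | some q =>
        if escape then ' ' :: goA rest false (some q) false
        else if ch = '\\' then ' ' :: goA rest false (some q) true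
        else if ch = q then ch :: goA rest false none false
        else ' ' :: goA rest false (some q) false
      | none =>
        if ch = '/' ∧ rest.head? = some '*' then ' ' :: ' ' :: goA rest.tail true none escape
        else if ch = '\'' ∨ ch = '"' then ch :: goA rest false (some ch) escape
        else ch :: goA rest false none escape
  termination_by cs => cs.length
  decreasing_by all_goals (simp [List.length_tail]; try omega)

def strip_css_noise (css : String) : String :=
  String.ofList (goA css.toList false none false)

-- ===== PORT B =====
-- B's comment scan (css.find of the terminator): (number of blanked chars incl. the terminator or to end, remainder).
def commentLen : List Char → Nat × List Char
  | [] => (0, [])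
  | c :: r =>
    if c = '*' ∧ r.head? = some '/' then (2, r.tail)
    else ((commentLen r).1 + 1, (commentLen r).2)

-- B's closing-quote scan (skipping backslash pairs): (blanked body length, closed?, remainder after close).
def stringLen (q : Char) : List Char → Nat × Bool × List Char
  | [] => (0, false, [])
  | c :: r =>
    if c = q then (0, true, r)
    else if c = '\\' then
      match r with
      | [] => (1, false, [])
      | _ :: r2 => ((stringLen q r2).1 + 2, (stringLen q r2).2.1, (stringLen q r2).2.2)
    else ((stringLen q r).1 + 1, (stringLen q r).2.1, (stringLen q r).2.2)

theorem commentLen_len (cs : List Char) : (commentLen cs).2.length ≤ cs.length := by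
  fun_induction commentLen cs <;> simp_all [List.length_tail] <;> omega

theorem stringLen_len (q : Char) (cs : List Char) : (stringLen q cs).2.2.length ≤ cs.length := by
  fun_induction stringLen q cs <;> simp_all <;> omega

def goB : List Char → List Char
  | [] => []
  | ch :: r =>
    if ch = '/' ∧ r.head? = some '*' then
      ' ' :: ' ' :: (List.replicate (commentLen r.tail).1 ' ' ++ goB (commentLen r.tail).2)
    else if ch = '\'' ∨ ch = '"' then
      ch :: (List.replicate (stringLen ch r).1 ' ' ++
        (if (stringLen ch r).2.1 then [ch] else []) ++ goB (stringLen ch r).2.2)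
    else ch :: goB r
  termination_by cs => cs.length
  decreasing_by
  · have h1 := commentLen_len r.tail
    have h2 : r.tail.length ≤ r.length := by cases r <;> simp
    simp; omega
  · have := stringLen_len ch r; simp; omega
  · simp

def strip_css_noise_alt (css : String) : String :=
  String.ofList (goB css.toList)

-- ===== PRECONDITION & SPEC =====
def Spec_strip_css_noise (css : String) (out : String) : Prop := out = strip_css_noise_alt css
instance (css : String) (out : String) : Decidable (Spec_strip_css_noise css out) := by unfold Spec_strip_css_noise; infer_instance

-- ===== CLAIM (what is proved, stated in full; the proofs are below) =====
def Claim_equal_strip_css_noise : Prop := ∀ (css : String), Dom_strip_css_noise css → Spec_strip_css_noise css (strip_css_noise css)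

-- ===== LEMMAS AND PROOFS =====
-- A in comment mode = one run of spaces, then resume after the comment terminator.
theorem goA_comment (cs : List Char) (s : Option Char) (e : Bool) :
    goA cs true s e = List.replicate (commentLen cs).1 ' ' ++ goA (commentLen cs).2 false s e := by
  fun_induction commentLen cs with
  | case1 => simp [goA]
  | case2 c r h =>
    obtain ⟨rfl, hh⟩ := h
    rw [goA.eq_def]; simp [hh]
  | case3 c r h ih =>
    rw [goA.eq_def]; simp [h, ih, List.replicate_succ]

-- A in string mode (escape clear) = blanked body, closing quote if found, then resume.
theorem goA_string (q : Char) (hq : q = '\'' ∨ q = '"') (cs : List Char) :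
    goA cs false (some q) false =
      List.replicate (stringLen q cs).1 ' ' ++
        (if (stringLen q cs).2.1 then [q] else []) ++ goA (stringLen q cs).2.2 false none false := by
  have hqb : ¬ q = '\\' := by rcases hq with rfl | rfl <;> decide
  fun_induction stringLen q cs with
  | case1 => simp [goA]
  | case2 r => rw [goA.eq_def]; simp [hqb]
  | case3 h => rw [goA.eq_def]; simp [goA, List.replicate_succ]
  | case4 d r2 h ih =>
    rw [goA.eq_def]; simp
    rw [goA.eq_def]; simp [List.replicate_succ, ih]
  | case5 c r h1 h2 ih =>
    rw [goA.eq_def]; simp [h1, h2, List.replicate_succ, ih]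

theorem goA_eq_goB (cs : List Char) : goA cs false none false = goB cs := by
  fun_induction goB cs with
  | case1 => simp [goA]
  | case2 c r h ih =>
    obtain ⟨rfl, hh⟩ := h
    rw [goA.eq_def, goB.eq_def]; simp [hh, goA_comment, ih]
    rw [goB.eq_def]; simp
  | case3 c r h1 h2 ih =>
    rcases h2 with rfl | rfl <;>
    · rw [goA.eq_def, goB.eq_def]
      simp [goA_string _ (Or.inl rfl), goA_string _ (Or.inr rfl), ih]
      rw [goB.eq_def]; simp
  | case4 c r h1 h2 ih =>
    rw [goA.eq_def, goB.eq_def]; simp [h1, h2, ih]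
    rw [goB.eq_def]; simp

-- ===== VERDICT (by name: the statement is the Claim_ definition above) =====
theorem strip_css_noise_spec : Claim_equal_strip_css_noise := by
  intro css _
  unfold Spec_strip_css_noise strip_css_noise strip_css_noise_alt
  rw [goA_eq_goB]
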